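-- pv_equiv track=rewrite | github.com/bryceklund/codewars-projects | Codewars - Count the Digit.py | nb_dig
-- ===== SOURCE A (Python) =====
-- def nb_dig(n, d):
--     # your code
--     n = n
--     klist = []
--     kliststr = None
--     ncount = 0
--     for k in range(n + 1):
--         squared = k ** 2
--         klist.append(squared)
--     kliststr = "".join(str(nums) for nums in klist)
--     for num in kliststr:
--         if num == str(d):
--             ncount += 1
--     return ncount
-- ===== SOURCE B (Python) =====
-- def nb_dig(n, d):
--     # Pure-arithmetic digit count: extract decimal digits of each square with divmod,
--     # never converting anything to a string.
--     if not (0 <= d <= 9):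
--         return 0
--     total = 0
--     for k in range(n + 1):
--         v = k * k
--         if v == 0:
--             if d == 0:
--                 total += 1
--         while v > 0:
--             v, r = divmod(v, 10)
--             if r == d:
--                 total += 1
--     return total
-- ===== Notes on version B (the rewrite author's own statement) =====
-- stated objective: alternative
-- what changed: B counts the decimal digits of each square purely arithmetically with a divmod-by-10 loop (plus a natural 0<=d<=9 digit guard), building no list of squares, no strings and no joined text, instead of A's list build + string join + character scan.
import Mathlib
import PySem

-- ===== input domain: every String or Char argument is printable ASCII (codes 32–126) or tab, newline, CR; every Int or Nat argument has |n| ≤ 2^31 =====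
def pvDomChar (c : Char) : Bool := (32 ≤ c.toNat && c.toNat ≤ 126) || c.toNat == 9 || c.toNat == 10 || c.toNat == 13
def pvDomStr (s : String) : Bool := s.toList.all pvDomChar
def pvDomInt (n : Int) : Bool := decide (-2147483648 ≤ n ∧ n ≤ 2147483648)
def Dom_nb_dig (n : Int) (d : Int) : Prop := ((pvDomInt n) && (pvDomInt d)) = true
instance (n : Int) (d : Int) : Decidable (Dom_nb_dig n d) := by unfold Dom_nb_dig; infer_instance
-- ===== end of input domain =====

-- B counts the decimal digits of each square purely arithmetically (divmod by 10),
-- building no lists and no strings, instead of A's square-list build + string join +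
-- char-by-char scan. (objective: alternative)

-- ===== PORT A =====
-- literal port of A: build klist of squares, join their digit strings, scan chars counting matches with str(d)
def nb_dig (n : Int) (d : Int) : Int :=
  let klist : List Int :=
    (PySem.List.pyRange 0 (n + 1) 1).foldl (fun acc k => acc ++ [k ^ 2]) []
  let kliststr : List Char :=
    klist.foldl (fun s nums => s ++ PySem.Int.toChars nums) []
  kliststr.foldl
    (fun ncount num => if String.ofList [num] == PySem.Int.toStr d then ncount + 1 else ncount) 0

-- ===== PORT B =====
-- the `while v > 0: v, r = divmod(v, 10); if r == d: total += 1` loop of B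
def nbDigLoop (v : Int) (total : Int) (d : Int) : Int :=
  if h : 0 < v then
    nbDigLoop (PySem.Int.floordiv v 10)
      (if PySem.Int.mod v 10 == d then total + 1 else total) d
  else total
termination_by v.toNat
decreasing_by
  rw [PySem.Int.floordiv_eq_ediv_of_pos (by omega)]
  omega

-- literal port of B: digit-range guard, then for each k extract the digits of k*k by divmod
def nb_dig_alt (n : Int) (d : Int) : Int :=
  if ¬ (0 ≤ d ∧ d ≤ 9) then 0
  else
    (PySem.List.pyRange 0 (n + 1) 1).foldl
      (fun total k =>
        let v := k * k
        let total := if v == 0 then (if d == 0 then total + 1 else total) else total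
        nbDigLoop v total d)
      0

-- ===== PRECONDITION & SPEC =====
def Spec_nb_dig (n : Int) (d : Int) (out : Int) : Prop := out = nb_dig_alt n d
instance (n : Int) (d : Int) (out : Int) : Decidable (Spec_nb_dig n d out) := by unfold Spec_nb_dig; infer_instance

-- ===== CLAIM (what is proved, stated in full; the proofs are below) =====
def Claim_equal_nb_dig : Prop := ∀ (n : Int) (d : Int), Dom_nb_dig n d → Spec_nb_dig n d (nb_dig n d)

-- ===== LEMMAS AND PROOFS =====

-- the big-endian decimal digit characters of a natural number (what Nat.toDigits 10 computes)
def digitsAux (m : Nat) : List Char :=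
  if h : m / 10 = 0 then [Nat.digitChar (m % 10)]
  else digitsAux (m / 10) ++ [Nat.digitChar (m % 10)]
termination_by m
decreasing_by omega

theorem digitsAux_ne_nil (m : Nat) : digitsAux m ≠ [] := by
  rw [digitsAux]; split <;> simp

theorem toDigitsCore_eq (fuel m : Nat) (ds : List Char) (h : m < fuel) :
    Nat.toDigitsCore 10 fuel m ds = digitsAux m ++ ds := by
  induction fuel generalizing m ds with
  | zero => omega
  | succ fuel ih =>
    rw [Nat.toDigitsCore, digitsAux]
    by_cases h0 : m / 10 = 0
    · simp [h0]
    · have hlt : m / 10 < fuel := by omega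
      simp [h0, ih _ _ hlt]

theorem toDigits_eq (m : Nat) : Nat.toDigits 10 m = digitsAux m :=
  (toDigitsCore_eq (m + 1) m [] (by omega)).trans (by simp)

theorem toChars_nonneg (m : Nat) : PySem.Int.toChars (m : Int) = digitsAux m := by
  simp [PySem.Int.toChars, toDigits_eq]

-- single-digit d prints as one digit character
theorem toChars_digit (d : Int) (h0 : 0 ≤ d) (h9 : d ≤ 9) :
    PySem.Int.toChars d = [Nat.digitChar d.toNat] := by
  have hd : d = ((d.toNat : Nat) : Int) := by omega
  rw [hd, toChars_nonneg, digitsAux]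
  have h10 : d.toNat / 10 = 0 := by omega
  have hm : d.toNat % 10 = d.toNat := by omega
  simp [h10, hm]
  congr 1
  omega

theorem digitChar_inj : ∀ a < 10, ∀ b < 10, (Nat.digitChar a = Nat.digitChar b ↔ a = b) := by
  decide

-- the character-match predicate A uses, on a digit character, for a single-digit d
theorem pred_digit (d : Int) (h0 : 0 ≤ d) (h9 : d ≤ 9) (a : Nat) (ha : a < 10) :
    (String.ofList [Nat.digitChar a] == PySem.Int.toStr d) = (((a : Nat) : Int) == d) := by
  rw [PySem.Int.toStr, toChars_digit d h0 h9]
  by_cases h : a = d.toNat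
  · subst h
    simp
    omega
  · have h1 : ¬ ([Nat.digitChar a] = [Nat.digitChar d.toNat]) := by
      simp only [List.cons.injEq, and_true]
      intro hc
      exact h ((digitChar_inj a ha d.toNat (by omega)).mp hc)
    have h2 : ¬ ((a : Int) = d) := by omega
    simp [String.ofList_inj, h1, h2]

theorem nbDigLoop_nonpos (v t d : Int) (h : ¬ 0 < v) : nbDigLoop v t d = t := by
  rw [nbDigLoop, dif_neg h]

-- B's divmod loop counts exactly the matching digit characters of digitsAux
theorem nbDigLoop_spec (d : Int) (h0 : 0 ≤ d) (h9 : d ≤ 9) (m : Nat) (hm : 0 < m) :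
    ∀ total, nbDigLoop (m : Int) total d
      = total + ((digitsAux m).countP (fun c => String.ofList [c] == PySem.Int.toStr d) : Int) := by
  induction m using Nat.strong_induction_on with
  | _ m ih =>
    intro total
    rw [nbDigLoop, dif_pos (by exact_mod_cast hm)]
    have hdiv : PySem.Int.floordiv (m : Int) 10 = ((m / 10 : Nat) : Int) :=
      PySem.Int.floordiv_natCast m 10
    have hmod : PySem.Int.mod (m : Int) 10 = ((m % 10 : Nat) : Int) :=
      PySem.Int.mod_natCast m 10
    have hpred := pred_digit d h0 h9 (m % 10) (by omega)
    rw [digitsAux, hdiv, hmod]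
    by_cases hq : m / 10 = 0
    · rw [dif_pos hq]
      simp only [hq, Nat.cast_zero]
      rw [nbDigLoop_nonpos _ _ _ (by omega)]
      rw [List.countP_singleton, hpred]
      simp only [beq_iff_eq]
      split <;> simp
    · rw [dif_neg hq]
      rw [ih (m / 10) (by omega) (by omega)]
      rw [List.countP_append, List.countP_singleton, hpred]
      simp only [beq_iff_eq]
      split <;> push_cast <;> ring

-- A-side reshaping lemmas (from the ports' folds to countP over the joined digits)
theorem klist_eq (ks : List Int) (acc : List Int) :
    ks.foldl (fun acc k => acc ++ [k ^ 2]) acc = acc ++ ks.map (fun k => k ^ 2) := by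
  induction ks generalizing acc with
  | nil => simp
  | cons k ks ih => simp [List.foldl, ih]

theorem join_eq (xs : List Int) (s : List Char) :
    xs.foldl (fun s nums => s ++ PySem.Int.toChars nums) s
      = s ++ xs.flatMap PySem.Int.toChars := by
  induction xs generalizing s with
  | nil => simp
  | cons x xs ih => simp [List.foldl, ih]

theorem scan_eq (t : String) (cs : List Char) (a : Int) :
    cs.foldl (fun ncount num => if String.ofList [num] == t then ncount + 1 else ncount) a
      = a + (cs.countP (fun c => String.ofList [c] == t) : Int) := by
  induction cs generalizing a with
  | nil => simp
  | cons c cs ih =>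
    simp only [List.foldl, List.countP_cons]
    by_cases h : String.ofList [c] == t
    · rw [if_pos h, ih, if_pos h]; push_cast; ring
    · rw [if_neg h, ih, if_neg h]; simp

-- counting in the digits of zero: one '0' character, matched exactly when d = 0
theorem count_digits_zero (d : Int) (h0 : 0 ≤ d) (h9 : d ≤ 9) :
    ((digitsAux 0).countP (fun c => String.ofList [c] == PySem.Int.toStr d))
      = if d = 0 then 1 else 0 := by
  rw [digitsAux, dif_pos (by norm_num : (0 : Nat) / 10 = 0), List.countP_singleton]
  have hp0 := pred_digit d h0 h9 (0 % 10) (by omega)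
  rw [hp0]
  simp only [beq_iff_eq]
  by_cases hd : d = 0
  · simp [hd]
  · simp [hd]
    omega

-- B's whole fold equals A's countP over the flatMap, for single-digit d
theorem fold_eq (d : Int) (h0 : 0 ≤ d) (h9 : d ≤ 9) (ks : List Int)
    (hks : ∀ k ∈ ks, 0 ≤ k) : ∀ total : Int,
    ks.foldl
      (fun total k =>
        let v := k * k
        let total := if v == 0 then (if d == 0 then total + 1 else total) else total
        nbDigLoop v total d)
      total
    = total + ((ks.flatMap (fun k => PySem.Int.toChars (k ^ 2))).countP
        (fun c => String.ofList [c] == PySem.Int.toStr d) : Int) := by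
  induction ks with
  | nil => simp
  | cons k ks ih =>
    intro total
    have hk : 0 ≤ k := hks k (List.mem_cons_self ..)
    have hnn : 0 ≤ k * k := mul_nonneg hk hk
    have hsq : k ^ 2 = (((k * k).toNat : Nat) : Int) := by
      rw [pow_two]; omega
    rw [List.foldl_cons, List.flatMap_cons, List.countP_append,
      ih (fun k hk => hks k (List.mem_cons_of_mem _ hk))]
    simp only [hsq, toChars_nonneg]
    by_cases hz : (k * k).toNat = 0
    · -- square is zero: the while loop does not run, the explicit branch counts d == 0
      have hkk : k * k = 0 := by omega
      rw [hkk, Int.toNat_zero, nbDigLoop_nonpos _ _ _ (by omega), count_digits_zero d h0 h9]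
      by_cases hd : d = 0 <;> simp [hd] <;> push_cast <;> omega
    · have hbr : (if (k * k == 0) = true
            then (if (d == 0) = true then total + 1 else total) else total) = total := by
        simp [show ¬ (k * k = 0) by omega]
      rw [hbr]
      have hcast : k * k = (((k * k).toNat : Nat) : Int) := by omega
      rw [hcast, nbDigLoop_spec d h0 h9 (k * k).toNat (by omega)]
      simp only [Int.toNat_natCast]
      push_cast
      ring
-- when d is not a single digit, str(d) has at least two characters, so A counts nothing
theorem pred_false (d : Int) (h : ¬ (0 ≤ d ∧ d ≤ 9)) (c : Char) :
    (String.ofList [c] == PySem.Int.toStr d) = false := by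
  rw [PySem.Int.toStr]
  have hlen : 2 ≤ (PySem.Int.toChars d).length := by
    rw [PySem.Int.toChars]
    by_cases hneg : d < 0
    · rw [if_pos hneg, List.length_cons, toDigits_eq]
      have h1 := digitsAux_ne_nil d.natAbs
      have h2 : 0 < (digitsAux d.natAbs).length := List.length_pos_of_ne_nil h1
      omega
    · rw [if_neg hneg, toDigits_eq, digitsAux]
      have h10 : ¬ d.toNat / 10 = 0 := by omega
      rw [dif_neg h10]
      have h1 := digitsAux_ne_nil (d.toNat / 10)
      have h2 : 0 < (digitsAux (d.toNat / 10)).length := List.length_pos_of_ne_nil h1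
      simp
      omega
  have hne : ¬ ([c] = (PySem.Int.toChars d)) := by
    intro he
    have : ([c] : List Char).length = (PySem.Int.toChars d).length := by rw [he]
    simp at this
    omega
  simp [String.ofList_inj, hne]

-- ===== VERDICT (by name: the statement is the Claim_ definition above) =====
theorem nb_dig_spec : Claim_equal_nb_dig := by
  intro n d _
  show nb_dig n d = nb_dig_alt n d
  simp only [nb_dig, nb_dig_alt]
  rw [klist_eq, join_eq, scan_eq]
  simp only [List.nil_append, List.flatMap_map, Function.comp_def]
  by_cases hd : 0 ≤ d ∧ d ≤ 9
  · rw [if_neg (by simpa using hd)]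
    rw [fold_eq d hd.1 hd.2 _ (fun k hk => ((PySem.List.mem_pyRange_one).mp hk).1) 0]
  · rw [if_pos (by simpa using hd)]
    have hz : ((PySem.List.pyRange 0 (n + 1) 1).flatMap fun k => PySem.Int.toChars (k ^ 2)).countP
        (fun c => String.ofList [c] == PySem.Int.toStr d) = 0 := by
      rw [List.countP_eq_zero]
      intro c _
      simp [pred_false d hd c]
    rw [hz]
    simp
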